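-- pv_equiv track=rewrite | github.com/Antares0982/telegram-dice-bot | dicefunc.py | isadicename
-- ===== SOURCE A (Python) =====
-- def isint(a: str) -> bool:
--     try:
--         int(a)
--     except:
--         return False
--     return True
--
-- def isadicename(dicename: str) -> bool:
--     """判断`dicename`是否是一个可以计算的骰子字符串。
--
--     一个可以计算的骰子字符串应当是类似于这样的字符串：`3`或`3d6`或`2d6+6+1d10`，即单项骰子或数字，也可以是骰子与数字相加"""
--     if not isint(dicename):  # 不是数字，先判断是否有'+'
--         if dicename.find("+") == -1:  # 没有'+'，判断是否是单项骰子
--             if dicename.find("d") == -1: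
--                 return False
--             a, b = dicename.split("d", maxsplit=1)
--             if not isint(a) or not isint(b):
--                 return False
--             return True
--         else:  # 有'+'，split后递归判断是否每一项都是单项骰子
--             dices = dicename.split("+")
--             for dice in dices:
--                 if not isadicename(dice):
--                     return False
--             return True
--     # 是数字
--     if int(dicename) >= 0:
--         return True
--     return False
-- ===== SOURCE B (Python) =====
-- def isint(a: str) -> bool:
--     try:
--         int(a)
--     except:
--         return False
--     return True
--
-- def isadicename(dicename: str) -> bool:
--     """Iterative single pass: one split on '+' and a flat per-term check,
--     instead of A's recursive self-dispatch."""
--     if isint(dicename):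
--         return int(dicename) >= 0
--     for term in dicename.split("+"):
--         if isint(term):
--             if int(term) < 0:
--                 return False
--         elif "d" in term:
--             a, b = term.split("d", 1)
--             if not (isint(a) and isint(b)):
--                 return False
--         else:
--             return False
--     return True
-- ===== Notes on version B (the rewrite author's own statement) =====
-- stated objective: simpler
-- what changed: Replaced A's recursive self-dispatch (which re-splits each part and recurses on it) by one top-level integer check, a single split on the plus separator, and a flat iterative per-term validity check.
import Mathlib
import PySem

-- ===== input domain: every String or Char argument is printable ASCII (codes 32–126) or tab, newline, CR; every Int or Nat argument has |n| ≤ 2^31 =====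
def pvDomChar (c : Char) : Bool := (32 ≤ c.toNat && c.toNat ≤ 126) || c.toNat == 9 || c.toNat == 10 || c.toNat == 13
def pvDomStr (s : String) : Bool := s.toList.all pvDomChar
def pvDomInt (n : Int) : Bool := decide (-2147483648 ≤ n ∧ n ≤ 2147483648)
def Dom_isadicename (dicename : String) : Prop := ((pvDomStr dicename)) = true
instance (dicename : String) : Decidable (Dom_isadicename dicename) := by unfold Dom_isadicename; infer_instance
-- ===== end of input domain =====

-- B replaces A's recursive self-dispatch over the plus-separated parts by one split
-- and a flat per-term check (simpler decomposition, same asymptotic cost).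

-- ===== PORT A =====

-- Python's isint(a): int(a) succeeds
def pyIsint (cs : List Char) : Bool := (PySem.Int.ofChars? cs).isSome

-- termination lemma for the recursive '+' branch of A: when '+' occurs in the
-- string, every part produced by split('+') is strictly shorter
theorem pvGoLen (c : Char) : ∀ (fuel : Nat) (l cur : List Char) (acc : List (List Char)),
    l.length < fuel →
    ∀ p ∈ PySem.Chars.splitOn.go [c] fuel l cur acc,
      p ∈ acc ∨ p.length + l.count c ≤ cur.length + l.length := by
  intro fuel
  induction fuel with
  | zero => intro l cur acc h; omega
  | succ n ih =>
    intro l cur acc h p hp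
    cases l with
    | nil =>
      simp only [PySem.Chars.splitOn.go] at hp
      rw [List.mem_reverse, List.mem_cons] at hp
      rcases hp with hp | hp
      · right; simp [hp]
      · left; exact hp
    | cons c' rest =>
      simp only [PySem.Chars.splitOn.go] at hp
      by_cases hpre : List.isPrefixOf [c] (c' :: rest) = true
      · rw [if_pos hpre] at hp
        have hc : c' = c := by
          simp [List.isPrefixOf] at hpre; exact hpre.symm
        have h2 := ih rest [] (cur.reverse :: acc) (by simpa using Nat.lt_of_succ_lt_succ h) p (by simpa using hp)
        rw [List.mem_cons] at h2
        rcases h2 with (hmem | hmem) | hlen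
        · right
          have : p.length = cur.length := by simp [hmem]
          have hcnt : (c' :: rest).count c ≤ (c' :: rest).length := List.count_le_length
          have hb : (c' :: rest).length = rest.length + 1 := by simp
          omega
        · left; exact hmem
        · right
          have : (c' :: rest).count c = rest.count c + 1 := by
            simp [hc]
          simp only [List.length_cons, this]
          simp only [List.length_nil] at hlen
          omega
      · rw [if_neg hpre] at hp
        have h2 := ih rest (c' :: cur) acc (by simpa using Nat.lt_of_succ_lt_succ h) p hp
        rcases h2 with hmem | hlen
        · left; exact hmem
        · right
          have hne : c' ≠ c := by
            intro hcc; apply hpre; simp [List.isPrefixOf, hcc]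
          have : (c' :: rest).count c = rest.count c := by
            simp [hne]
          simp only [List.length_cons, this]
          simp only [List.length_cons] at hlen
          omega

theorem pvSplitOn_len (c : Char) (s : List Char) (hc : c ∈ s) :
    ∀ p ∈ PySem.Chars.splitOn s [c], p.length < s.length := by
  intro p hp
  have := pvGoLen c (s.length + 1) s [] [] (by omega) p hp
  rcases this with h | h
  · simp at h
  · have : 0 < s.count c := List.count_pos_iff.mpr hc
    simp only [List.length_nil] at h
    omega

-- literal port of A (well-founded recursion on the string length; the
-- recursive call happens only in the '+' branch, on strictly shorter parts)
def isadicenameCore (cs : List Char) : Bool :=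
  if pyIsint cs = false then
    if PySem.Chars.find cs ['+'] = -1 then
      if PySem.Chars.find cs ['d'] = -1 then false
      else
        match PySem.Chars.splitOnMax cs ['d'] 1 with
        | [a, b] => if pyIsint a = false || pyIsint b = false then false else true
        | _ => false  -- unpacking `a, b = …` with 'd' present always yields 2 parts
    else
      (PySem.Chars.splitOn cs ['+']).attach.all (fun d => isadicenameCore d.1)
  else
    match PySem.Int.ofChars? cs with
    | some n => if 0 ≤ n then true else false
    | none => false
termination_by cs.length
decreasing_by
  have hfind : PySem.Chars.find cs ['+'] ≠ -1 := by assumption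
  have hinf : ['+'] <:+: cs := (PySem.Chars.find_ne_neg_one_iff cs ['+']).mp hfind
  have hmem : '+' ∈ cs := hinf.mem (by simp)
  exact pvSplitOn_len '+' cs hmem d.1 d.2

def isadicename (dicename : String) : Bool := isadicenameCore dicename.toList

-- ===== PORT B =====

-- B's per-term check inside the loop body
def pvTermOk (t : List Char) : Bool :=
  match PySem.Int.ofChars? t with
  | some n => decide (0 ≤ n)
  | none =>
    if PySem.Chars.isIn ['d'] t then
      match PySem.Chars.splitOnMax t ['d'] 1 with
      | [a, b] => pyIsint a && pyIsint b
      | _ => false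
    else false

def isadicename_alt (dicename : String) : Bool :=
  match PySem.Int.ofChars? dicename.toList with
  | some n => decide (0 ≤ n)
  | none => (PySem.Chars.splitOn dicename.toList ['+']).all pvTermOk

-- ===== PRECONDITION & SPEC =====
def Spec_isadicename (dicename : String) (out : Bool) : Prop := out = isadicename_alt dicename
instance (dicename : String) (out : Bool) : Decidable (Spec_isadicename dicename out) := by unfold Spec_isadicename; infer_instance

-- ===== CLAIM (what is proved, stated in full; the proofs are below) =====
def Claim_equal_isadicename : Prop := ∀ (dicename : String), Dom_isadicename dicename → Spec_isadicename dicename (isadicename dicename)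

-- ===== LEMMAS AND PROOFS =====

-- parts of split(c) never contain the separator c
theorem pvGoNoSep (c : Char) : ∀ (fuel : Nat) (l cur : List Char) (acc : List (List Char)),
    l.length < fuel → c ∉ cur →
    ∀ p ∈ PySem.Chars.splitOn.go [c] fuel l cur acc, p ∈ acc ∨ c ∉ p := by
  intro fuel
  induction fuel with
  | zero => intro l cur acc h; omega
  | succ n ih =>
    intro l cur acc h hcur p hp
    cases l with
    | nil =>
      simp only [PySem.Chars.splitOn.go] at hp
      rw [List.mem_reverse, List.mem_cons] at hp
      rcases hp with hp | hp
      · right; rw [hp]; simpa using hcur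
      · left; exact hp
    | cons c' rest =>
      simp only [PySem.Chars.splitOn.go] at hp
      by_cases hpre : List.isPrefixOf [c] (c' :: rest) = true
      · rw [if_pos hpre] at hp
        have h2 := ih rest [] (cur.reverse :: acc) (by simpa using Nat.lt_of_succ_lt_succ h)
          (by simp) p (by simpa using hp)
        rw [List.mem_cons] at h2
        rcases h2 with (hm | hm) | hm
        · right; rw [hm]; simpa using hcur
        · left; exact hm
        · right; exact hm
      · rw [if_neg hpre] at hp
        have hne : c' ≠ c := by
          intro hcc; apply hpre; simp [List.isPrefixOf, hcc]
        have := ih rest (c' :: cur) acc (by simpa using Nat.lt_of_succ_lt_succ h)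
          (by simp [hcur, Ne.symm hne]) p hp
        exact this

theorem pvSplitOn_no_sep (c : Char) (s : List Char) :
    ∀ p ∈ PySem.Chars.splitOn s [c], c ∉ p := by
  intro p hp
  have := pvGoNoSep c (s.length + 1) s [] [] (by omega) (by simp) p hp
  rcases this with h | h
  · simp at h
  · exact h

-- c ∉ s → split(c) returns the whole string as the single part
theorem pvGoWhole (c : Char) : ∀ (fuel : Nat) (l cur : List Char) (acc : List (List Char)),
    l.length < fuel → c ∉ l →
    PySem.Chars.splitOn.go [c] fuel l cur acc = ((cur.reverse ++ l) :: acc).reverse := by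
  intro fuel
  induction fuel with
  | zero => intro l cur acc h; omega
  | succ n ih =>
    intro l cur acc h hcl
    cases l with
    | nil => simp [PySem.Chars.splitOn.go]
    | cons c' rest =>
      have hne : c' ≠ c := fun hcc => hcl (by simp [hcc])
      have hpre : List.isPrefixOf [c] (c' :: rest) = false := by
        simp [List.isPrefixOf, Ne.symm hne]
      simp only [PySem.Chars.splitOn.go, hpre, Bool.false_eq_true, if_false]
      rw [ih rest (c' :: cur) acc (by simpa using Nat.lt_of_succ_lt_succ h)
        (fun hm => hcl (by simp [hm]))]
      simp

theorem pvSplitOn_single (c : Char) (s : List Char) (hc : c ∉ s) :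
    PySem.Chars.splitOn s [c] = [s] := by
  unfold PySem.Chars.splitOn
  rw [pvGoWhole c (s.length + 1) s [] [] (by omega) hc]
  simp

theorem pvInfix_singleton (c : Char) (s : List Char) : [c] <:+: s ↔ c ∈ s := by
  constructor
  · intro h; exact h.mem (by simp)
  · intro h
    obtain ⟨l₁, l₂, rfl⟩ := List.append_of_mem h
    exact ⟨l₁, l₂, by simp⟩

-- when '+' does not occur in t, one step of A's recursion equals B's term check
theorem pvCore_no_plus (t : List Char) (hp : '+' ∉ t) :
    isadicenameCore t = pvTermOk t := by
  rw [isadicenameCore]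
  unfold pvTermOk
  cases hint : PySem.Int.ofChars? t with
  | some n =>
    have : pyIsint t = true := by simp [pyIsint, hint]
    simp [this, hint]
  | none =>
    have hisf : pyIsint t = false := by simp [pyIsint, hint]
    have hfindp : PySem.Chars.find t ['+'] = -1 := by
      rw [PySem.Chars.find_eq_neg_one_iff, pvInfix_singleton]; exact hp
    rw [if_pos (by rw [hisf]), if_pos hfindp]
    have hisin : PySem.Chars.isIn ['d'] t = (PySem.Chars.find t ['d'] != -1) := rfl
    by_cases hd : PySem.Chars.find t ['d'] = -1
    · simp [hd, hisin]
    · rw [if_neg hd]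
      simp only [hisin, bne_iff_ne, ne_eq, hd, not_false_eq_true, if_true]
      cases hsplit : PySem.Chars.splitOnMax t ['d'] 1 with
      | nil => simp
      | cons a rest =>
        cases rest with
        | nil => simp
        | cons b rest2 =>
          cases rest2 with
          | nil =>
            by_cases ha : pyIsint a = true <;> by_cases hb : pyIsint b = true <;>
              simp [ha, hb]
          | cons _ _ => simp

-- ===== VERDICT (by name: the statement is the Claim_ definition above) =====
theorem isadicename_spec : Claim_equal_isadicename := by
  intro dicename _
  unfold Spec_isadicename isadicename isadicename_alt
  set cs := dicename.toList with hcs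
  cases hint : PySem.Int.ofChars? cs with
  | some n =>
    have : pyIsint cs = true := by simp [pyIsint, hint]
    rw [isadicenameCore]
    simp [this, hint]
  | none =>
    have hisf : pyIsint cs = false := by simp [pyIsint, hint]
    by_cases hplus : '+' ∈ cs
    · have hfind : PySem.Chars.find cs ['+'] ≠ -1 := by
        rw [ne_eq, PySem.Chars.find_eq_neg_one_iff, pvInfix_singleton]
        simpa using hplus
      rw [isadicenameCore]
      rw [if_pos (by rw [hisf]), if_neg hfind]
      have hall : ((PySem.Chars.splitOn cs ['+']).attach.all fun d => isadicenameCore d.1)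
          = (PySem.Chars.splitOn cs ['+']).all pvTermOk := by
        apply Bool.eq_iff_iff.mpr
        simp only [List.all_eq_true, List.mem_attach, forall_const, Subtype.forall]
        constructor
        · intro h p hp
          rw [← pvCore_no_plus p (pvSplitOn_no_sep '+' cs p hp)]
          exact h p hp
        · intro h p hp
          rw [pvCore_no_plus p (pvSplitOn_no_sep '+' cs p hp)]
          exact h p hp
      rw [hall]
    · have hsingle : PySem.Chars.splitOn cs ['+'] = [cs] :=
        pvSplitOn_single '+' cs hplus
      rw [pvCore_no_plus cs hplus]
      unfold pvTermOk
      rw [hint, hsingle]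
      simp [List.all_cons, hint]
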